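-- pv_equiv track=rewrite | github.com/preston-fay/kie-v3 | kie/skills/client_readiness.py | _determine_overall_readiness
-- ===== SOURCE A (Python) =====
-- from enum import Enum
-- from typing import Any
--
-- class ReadinessLabel(str, Enum):
--     """Ordinal readiness labels."""
--     CLIENT_READY = "CLIENT_READY"
--     CLIENT_READY_WITH_CAVEATS = "CLIENT_READY_WITH_CAVEATS"
--     INTERNAL_ONLY = "INTERNAL_ONLY"
--
-- def _determine_overall_readiness(
--     classifications: list[dict[str, Any]]
-- ) -> ReadinessLabel:
--     """Determine overall readiness from individual classifications."""
--     if not classifications: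
--         return ReadinessLabel.INTERNAL_ONLY
--
--     # If any INTERNAL_ONLY, overall is INTERNAL_ONLY
--     if any(c["label"] == ReadinessLabel.INTERNAL_ONLY for c in classifications):
--         return ReadinessLabel.INTERNAL_ONLY
--
--     # If any WITH_CAVEATS, overall is WITH_CAVEATS
--     if any(
--         c["label"] == ReadinessLabel.CLIENT_READY_WITH_CAVEATS
--         for c in classifications
--     ):
--         return ReadinessLabel.CLIENT_READY_WITH_CAVEATS
--
--     # All CLIENT_READY
--     return ReadinessLabel.CLIENT_READY
-- ===== SOURCE B (Python) =====
-- from enum import Enum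
-- from typing import Any
--
-- class ReadinessLabel(str, Enum):
--     """Ordinal readiness labels."""
--     CLIENT_READY = "CLIENT_READY"
--     CLIENT_READY_WITH_CAVEATS = "CLIENT_READY_WITH_CAVEATS"
--     INTERNAL_ONLY = "INTERNAL_ONLY"
--
-- _PRIORITY = {
--     ReadinessLabel.INTERNAL_ONLY: 2,
--     ReadinessLabel.CLIENT_READY_WITH_CAVEATS: 1,
-- }
-- _BY_RANK = [
--     ReadinessLabel.CLIENT_READY,
--     ReadinessLabel.CLIENT_READY_WITH_CAVEATS,
--     ReadinessLabel.INTERNAL_ONLY,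
-- ]
--
-- def _determine_overall_readiness(
--     classifications: list[dict[str, Any]]
-- ) -> ReadinessLabel:
--     """Determine overall readiness from individual classifications."""
--     if not classifications:
--         return ReadinessLabel.INTERNAL_ONLY
--     best = 0
--     for c in classifications:
--         best = max(best, _PRIORITY.get(c["label"], 0))
--     return _BY_RANK[best]
-- ===== Notes on version B (the rewrite author's own statement) =====
-- stated objective: alternative
-- what changed: Replaces A's two separate any-scans (one per label, worst-case two passes) with a single pass that tracks the maximum label priority via a rank table and converts the best rank back to a label at the end.
-- outside the precondition, e.g. on _determine_overall_readiness([{'label': 'INTERNAL_ONLY'}, {}]): A returns 'INTERNAL_ONLY', B raises KeyError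
import Mathlib
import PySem

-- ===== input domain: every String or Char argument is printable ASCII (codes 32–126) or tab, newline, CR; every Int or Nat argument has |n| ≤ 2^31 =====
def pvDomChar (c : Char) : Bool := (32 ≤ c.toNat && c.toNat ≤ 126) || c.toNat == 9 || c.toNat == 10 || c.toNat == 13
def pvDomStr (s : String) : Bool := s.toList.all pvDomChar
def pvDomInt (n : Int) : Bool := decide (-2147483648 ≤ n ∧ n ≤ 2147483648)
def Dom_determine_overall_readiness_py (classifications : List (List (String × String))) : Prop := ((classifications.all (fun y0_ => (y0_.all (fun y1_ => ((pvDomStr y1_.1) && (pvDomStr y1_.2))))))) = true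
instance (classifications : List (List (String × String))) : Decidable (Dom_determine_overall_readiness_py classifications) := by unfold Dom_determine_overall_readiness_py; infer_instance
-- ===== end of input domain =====

-- B replaces A's two any-scans with one pass tracking the maximum label rank (alternative decomposition).

-- first-match association-list lookup, c["label"]; "" stands for the (Pre_-excluded) missing-key case
def pvLabelOf (c : List (String × String)) : String :=
  ((c.find? (fun kv => kv.1 == "label")).map (·.2)).getD ""

-- ===== PORT A =====
def determine_overall_readiness_py (classifications : List (List (String × String))) : String :=
  if classifications = [] then "INTERNAL_ONLY"
  else if classifications.any (fun c => pvLabelOf c == "INTERNAL_ONLY") then "INTERNAL_ONLY"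
  else if classifications.any (fun c => pvLabelOf c == "CLIENT_READY_WITH_CAVEATS") then "CLIENT_READY_WITH_CAVEATS"
  else "CLIENT_READY"

-- ===== PORT B =====
def pvPriority : PySem.Dict String Nat := PySem.Dict.ofList [("INTERNAL_ONLY", 2), ("CLIENT_READY_WITH_CAVEATS", 1)]
def pvByRank : List String := ["CLIENT_READY", "CLIENT_READY_WITH_CAVEATS", "INTERNAL_ONLY"]

def determine_overall_readiness_py_alt (classifications : List (List (String × String))) : String :=
  if classifications = [] then "INTERNAL_ONLY"
  else
    let best := classifications.foldl (fun b c => max b (pvPriority.getD (pvLabelOf c) 0)) 0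
    pvByRank.getD best ""

-- ===== PRECONDITION & SPEC =====
-- Pre_ excludes lists containing a dict without a "label" key: Python A raises KeyError on them unless its
-- short-circuiting any() returns first, and B's single full pass raises KeyError there as well.
def Pre_determine_overall_readiness_py (classifications : List (List (String × String))) : Prop :=
  ∀ c ∈ classifications, (c.find? (fun kv => kv.1 == "label")).isSome
instance (classifications : List (List (String × String))) : Decidable (Pre_determine_overall_readiness_py classifications) := by unfold Pre_determine_overall_readiness_py; infer_instance
def pvWitness_determine_overall_readiness_py : (List (List (String × String))) := [[("label", "CLIENT_READY")]]

def Spec_determine_overall_readiness_py (classifications : List (List (String × String))) (out : String) : Prop := out = determine_overall_readiness_py_alt classifications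
instance (classifications : List (List (String × String))) (out : String) : Decidable (Spec_determine_overall_readiness_py classifications out) := by unfold Spec_determine_overall_readiness_py; infer_instance

-- ===== CLAIM (what is proved, stated in full; the proofs are below) =====
def Claim_equal_determine_overall_readiness_py : Prop := ∀ (classifications : List (List (String × String))), Dom_determine_overall_readiness_py classifications → Pre_determine_overall_readiness_py classifications → Spec_determine_overall_readiness_py classifications (determine_overall_readiness_py classifications)

-- ===== LEMMAS AND PROOFS =====

def pvRank (c : List (String × String)) : Nat := pvPriority.getD (pvLabelOf c) 0

-- per-element rank as a branch on the two label tests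
set_option maxRecDepth 4096 in
lemma pvRank_eq (c : List (String × String)) :
    pvRank c = if pvLabelOf c == "INTERNAL_ONLY" then 2
               else if pvLabelOf c == "CLIENT_READY_WITH_CAVEATS" then 1 else 0 := by
  have hit : pvPriority.items = [("INTERNAL_ONLY", (2 : Nat)), ("CLIENT_READY_WITH_CAVEATS", 1)] := by rfl
  unfold pvRank
  by_cases h2 : pvLabelOf c = "INTERNAL_ONLY"
  · rw [h2]; decide
  · by_cases h1 : pvLabelOf c = "CLIENT_READY_WITH_CAVEATS"
    · rw [h1]; decide
    · have e2 : ("INTERNAL_ONLY" == pvLabelOf c) = false := by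
        simp only [beq_eq_false_iff_ne]; exact Ne.symm h2
      have e1 : ("CLIENT_READY_WITH_CAVEATS" == pvLabelOf c) = false := by
        simp only [beq_eq_false_iff_ne]; exact Ne.symm h1
      have e2' : (pvLabelOf c == "INTERNAL_ONLY") = false := by
        simp only [beq_eq_false_iff_ne]; exact h2
      have e1' : (pvLabelOf c == "CLIENT_READY_WITH_CAVEATS") = false := by
        simp only [beq_eq_false_iff_ne]; exact h1
      simp [PySem.Dict.getD, PySem.Dict.get?, hit, List.find?, e2, e1, e2', e1']

def pvBest (cs : List (List (String × String))) : Nat :=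
  if cs.any (fun c => pvLabelOf c == "INTERNAL_ONLY") then 2
  else if cs.any (fun c => pvLabelOf c == "CLIENT_READY_WITH_CAVEATS") then 1 else 0

lemma pvBest_cons (c : List (String × String)) (cs : List (List (String × String))) :
    pvBest (c :: cs) = max (pvRank c) (pvBest cs) := by
  rw [pvRank_eq]
  unfold pvBest
  cases h2 : (pvLabelOf c == "INTERNAL_ONLY") <;>
    cases h1 : (pvLabelOf c == "CLIENT_READY_WITH_CAVEATS") <;>
    cases ha2 : cs.any (fun c => pvLabelOf c == "INTERNAL_ONLY") <;>
    cases ha1 : cs.any (fun c => pvLabelOf c == "CLIENT_READY_WITH_CAVEATS") <;>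
    simp [List.any_cons, h2, h1, ha2, ha1]

lemma foldl_max_rank (cs : List (List (String × String))) (b : Nat) :
    cs.foldl (fun b c => max b (pvPriority.getD (pvLabelOf c) 0)) b = max b (pvBest cs) := by
  induction cs generalizing b with
  | nil => simp [pvBest]
  | cons c cs ih =>
    simp only [List.foldl_cons, ih, pvBest_cons]
    have : pvPriority.getD (pvLabelOf c) 0 = pvRank c := rfl
    rw [this]
    omega

theorem determine_overall_readiness_py_spec : Claim_equal_determine_overall_readiness_py := by
  intro cs _ _
  unfold Spec_determine_overall_readiness_py determine_overall_readiness_py determine_overall_readiness_py_alt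
  by_cases hnil : cs = []
  · simp [hnil]
  · simp only [if_neg hnil, foldl_max_rank, Nat.zero_max]
    unfold pvBest
    cases h2 : cs.any (fun c => pvLabelOf c == "INTERNAL_ONLY") <;>
      cases h1 : cs.any (fun c => pvLabelOf c == "CLIENT_READY_WITH_CAVEATS") <;>
      simp [pvByRank]
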